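-- pv_equiv track=rewrite | github.com/bc36/leetcode | lc_Python/lc1800_1899.py | evaluate
-- ===== SOURCE A (Python) =====
-- from typing import List, Optional
--
-- def evaluate(s: str, knowledge: List[List[str]]) -> str:
--     d = dict(knowledge)
--     ans = ""
--     i = 0
--     while i < len(s):
--         if s[i] == "(":
--             k = ""
--             i += 1
--             while i < len(s) and s[i] != ")":
--                 k += s[i]
--                 i += 1
--             ans += d.get(k, "?")
--         else:
--             ans += s[i]
--         i += 1
--     return ans
-- ===== SOURCE B (Python) =====
-- def evaluate(s, knowledge):
--     d = dict(knowledge)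
--     out = []
--     rest = s
--     while True:
--         j = rest.find('(')
--         if j == -1:
--             out.append(rest)
--             break
--         out.append(rest[:j])
--         rest = rest[j + 1:]
--         k = rest.find(')')
--         if k == -1:
--             out.append(d.get(rest, '?'))
--             break
--         out.append(d.get(rest[:k], '?'))
--         rest = rest[k + 1:]
--     return ''.join(out)
-- ===== Notes on version B (the rewrite author's own statement) =====
-- stated objective: idiomatic
-- what changed: B replaces A's character-by-character index loop (building the answer by one-char string concatenations) with str.find jumps and slice copies that collect pieces into a list joined once at the end.
import Mathlib
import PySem

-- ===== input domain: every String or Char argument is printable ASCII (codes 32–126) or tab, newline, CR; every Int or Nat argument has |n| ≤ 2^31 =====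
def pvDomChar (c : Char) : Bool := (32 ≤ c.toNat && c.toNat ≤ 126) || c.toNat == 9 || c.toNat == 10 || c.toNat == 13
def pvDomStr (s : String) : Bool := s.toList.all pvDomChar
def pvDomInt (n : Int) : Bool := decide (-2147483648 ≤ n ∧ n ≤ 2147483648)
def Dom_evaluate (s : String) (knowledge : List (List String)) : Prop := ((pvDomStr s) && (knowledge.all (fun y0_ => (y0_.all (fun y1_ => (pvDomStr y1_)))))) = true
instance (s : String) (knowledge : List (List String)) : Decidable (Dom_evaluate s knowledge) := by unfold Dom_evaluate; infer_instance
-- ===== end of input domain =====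

-- B replaces A's character-by-character index loop (one-char string concatenations) with
-- str.find jumps and slice copies collected into a list joined once at the end (idiomatic).

-- ===== PORT A =====
-- d = dict(knowledge): each row is a (row[0], row[1]) pair (Pre_ guarantees rows of length 2)
def pvBuildDict (knowledge : List (List String)) : PySem.Dict String String :=
  PySem.Dict.ofList (knowledge.map (fun kv =>
    (PySem.List.pyGetD kv 0 "", PySem.List.pyGetD kv 1 "")))

-- inner while: collect key chars until ')' (consumed) or end of string
def evalCollect (acc : List Char) : List Char → List Char × List Char
  | [] => (acc, [])
  | c :: t => if c = ')' then (acc, t) else evalCollect (acc ++ [c]) t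

-- termination helper for the outer loop (cited by decreasing_by)
theorem evalCollect_snd_le (acc : List Char) (l : List Char) :
    (evalCollect acc l).2.length ≤ l.length := by
  induction l generalizing acc with
  | nil => simp [evalCollect]
  | cons c t ih =>
    simp only [evalCollect]
    split
    · simp
    · exact le_trans (ih _) (Nat.le_succ _)

-- outer while i < len(s), ans accumulated char by char
def evalLoopA (d : PySem.Dict String String) (ans : List Char) : List Char → List Char
  | [] => ans
  | c :: t =>
    if c = '(' then
      let p := evalCollect [] t
      evalLoopA d (ans ++ (d.getD (String.mk p.1) "?").toList) p.2
    else
      evalLoopA d (ans ++ [c]) t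
termination_by l => l.length
decreasing_by
  · exact Nat.lt_succ_of_le (evalCollect_snd_le [] t)
  · simp

def evaluate (s : String) (knowledge : List (List String)) : String :=
  String.mk (evalLoopA (pvBuildDict knowledge) [] s.toList)

-- ===== PORT B =====
-- termination helpers for the find/slice loop (cited by decreasing_by)
theorem pvFind_nonneg {l sub : List Char} (h : PySem.Chars.find l sub ≠ -1) :
    0 ≤ PySem.Chars.find l sub := by
  have := PySem.Chars.neg_one_le_find l sub
  omega

theorem pvFind_ne_nil {l : List Char} {c : Char} (h : PySem.Chars.find l [c] ≠ -1) :
    l ≠ [] := by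
  intro hl
  subst hl
  rw [Ne, PySem.Chars.find_eq_neg_one_iff] at h
  exact h (by simp)

-- B: while True: j = rest.find('('); … ; rest = rest[j+1:]; k = rest.find(')'); … ; rest = rest[k+1:]
def evalLoopB (d : PySem.Dict String String) (out : List (List Char)) (rest : List Char) :
    List (List Char) :=
  let j := PySem.Chars.find rest ['(']
  if hj : j = -1 then out ++ [rest]
  else
    let out1 := out ++ [PySem.List.slice rest none (some j)]
    let rest1 := PySem.List.slice rest (some (j + 1)) none
    let k := PySem.Chars.find rest1 [')']
    if hk : k = -1 then out1 ++ [(d.getD (String.mk rest1) "?").toList]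
    else
      evalLoopB d (out1 ++ [(d.getD (String.mk (PySem.List.slice rest1 none (some k))) "?").toList])
        (PySem.List.slice rest1 (some (k + 1)) none)
termination_by rest.length
decreasing_by
  have hj0 : 0 ≤ j := pvFind_nonneg hj
  have hne : rest ≠ [] := pvFind_ne_nil hj
  have hk0 : 0 ≤ k := pvFind_nonneg hk
  have hlp : 0 < rest.length := List.length_pos_of_ne_nil hne
  simp only [k, rest1, j] at hj0 hk0 ⊢
  rw [PySem.List.slice_from rest (by omega)] at hk0 ⊢
  rw [PySem.List.slice_from _ (by omega)]
  simp only [List.length_drop]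
  omega

def evaluate_alt (s : String) (knowledge : List (List String)) : String :=
  String.mk (PySem.Chars.join [] (evalLoopB (pvBuildDict knowledge) [] s.toList))

-- ===== PRECONDITION & SPEC =====
-- Pre_ excludes knowledge lists with a row whose length is not 2: there dict(knowledge)
-- raises ValueError in Python (in both A and B).
def Pre_evaluate (s : String) (knowledge : List (List String)) : Prop :=
  ∀ kv ∈ knowledge, kv.length = 2
instance (s : String) (knowledge : List (List String)) : Decidable (Pre_evaluate s knowledge) := by
  unfold Pre_evaluate; infer_instance

def pvWitness_evaluate : String × List (List String) := ("hello (name)!", [["name", "world"]])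

def Spec_evaluate (s : String) (knowledge : List (List String)) (out : String) : Prop :=
  out = evaluate_alt s knowledge
instance (s : String) (knowledge : List (List String)) (out : String) :
    Decidable (Spec_evaluate s knowledge out) := by unfold Spec_evaluate; infer_instance

-- ===== CLAIM (what is proved, stated in full; the proofs are below) =====
def Claim_equal_evaluate : Prop := ∀ (s : String) (knowledge : List (List String)),
  Dom_evaluate s knowledge → Pre_evaluate s knowledge → Spec_evaluate s knowledge (evaluate s knowledge)

-- ===== LEMMAS AND PROOFS =====

-- ''.join over a list of pieces is flatten
theorem pvJoin_flatten (parts : List (List Char)) :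
    PySem.Chars.join [] parts = parts.flatten := by
  induction parts with
  | nil => simp [PySem.Chars.join_nil]
  | cons p rest ih =>
    cases rest with
    | nil => simp [PySem.Chars.join_singleton]
    | cons q r =>
      rw [PySem.Chars.join_cons_cons]
      simp [ih]

-- find of a single character decomposes the list at its first occurrence
theorem pvFindChar_decomp (l : List Char) (c : Char) (h : PySem.Chars.find l [c] ≠ -1) :
    (PySem.Chars.find l [c]).toNat < l.length ∧
    l = l.take (PySem.Chars.find l [c]).toNat ++
        c :: l.drop ((PySem.Chars.find l [c]).toNat + 1) ∧
    c ∉ l.take (PySem.Chars.find l [c]).toNat := by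
  have h0 : 0 ≤ PySem.Chars.find l [c] := pvFind_nonneg h
  obtain ⟨hpre, hmin⟩ := PySem.Chars.find_spec h0
  set jn := (PySem.Chars.find l [c]).toNat with hjn
  have hlt : jn < l.length := by
    by_contra hge
    rw [List.drop_eq_nil_of_le (by omega)] at hpre
    simp at hpre
  have hget : l[jn] = c := by
    rw [List.drop_eq_getElem_cons hlt] at hpre
    obtain ⟨t, ht⟩ := hpre
    exact (List.cons_eq_cons.mp ht.symm).1
  refine ⟨hlt, ?_, ?_⟩
  · conv_lhs => rw [← List.take_append_drop jn l]
    rw [List.drop_eq_getElem_cons hlt, hget]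
  · intro hc
    obtain ⟨i, hi, hgi⟩ := List.getElem_of_mem hc
    have hilt : i < jn := by
      have := hi
      simp [List.length_take] at this
      omega
    apply hmin i hilt
    rw [List.getElem_take] at hgi
    refine ⟨l.drop (i + 1), ?_⟩
    conv_rhs => rw [List.drop_eq_getElem_cons (show i < l.length by omega)]
    simp [hgi]
  
-- if a character is absent, find returns -1
theorem pvFindChar_none {l : List Char} {c : Char} (h : c ∉ l) :
    PySem.Chars.find l [c] = -1 := by
  rw [PySem.Chars.find_eq_neg_one_iff, List.singleton_infix_iff]
  exact h

-- A's outer loop copies a '('-free prefix verbatim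
theorem pvLoopA_copy (d : PySem.Dict String String) (pre : List Char)
    (h : '(' ∉ pre) : ∀ (ans x : List Char),
    evalLoopA d ans (pre ++ x) = evalLoopA d (ans ++ pre) x := by
  induction pre with
  | nil => intro ans x; simp
  | cons c t ih =>
    intro ans x
    have hc : c ≠ '(' := by intro hc; exact h (by simp [hc])
    rw [List.cons_append, evalLoopA, if_neg hc, ih (by intro hm; exact h (by simp [hm]))]
    simp

-- A's inner loop when no ')' remains: consume everything
theorem pvCollect_no (l : List Char) (h : ')' ∉ l) : ∀ acc,
    evalCollect acc l = (acc ++ l, []) := by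
  induction l with
  | nil => intro acc; simp [evalCollect]
  | cons c t ih =>
    intro acc
    have hc : c ≠ ')' := by intro hc; exact h (by simp [hc])
    rw [evalCollect, if_neg hc, ih (by intro hm; exact h (by simp [hm]))]
    simp

-- A's inner loop stops at the first ')'
theorem pvCollect_split (pre t : List Char) (h : ')' ∉ pre) : ∀ acc,
    evalCollect acc (pre ++ ')' :: t) = (acc ++ pre, t) := by
  induction pre with
  | nil => intro acc; simp [evalCollect]
  | cons c p ih =>
    intro acc
    have hc : c ≠ ')' := by intro hc; exact h (by simp [hc])
    rw [List.cons_append, evalCollect, if_neg hc, ih (by intro hm; exact h (by simp [hm]))]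
    simp

-- B's loop with respect to its output accumulator
theorem pvLoopB_out (d : PySem.Dict String String) : ∀ (n : Nat) (rest : List Char),
    rest.length ≤ n → ∀ out,
    evalLoopB d out rest = out ++ evalLoopB d [] rest := by
  intro n
  induction n with
  | zero =>
    intro rest hlen out
    have : rest = [] := List.eq_nil_of_length_eq_zero (by omega)
    subst this
    rw [evalLoopB, evalLoopB]
    simp [pvFindChar_none (by simp : '(' ∉ ([] : List Char))]
  | succ n ih =>
    intro rest hlen out
    rw [evalLoopB, evalLoopB]
    by_cases hj : PySem.Chars.find rest ['('] = -1
    · simp [hj]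
    · simp only [dif_neg hj]
      by_cases hk : PySem.Chars.find (PySem.List.slice rest (some (PySem.Chars.find rest ['('] + 1)) none) [')'] = -1
      · simp [dif_pos hk]
      · simp only [dif_neg hk]
        have hj0 : 0 ≤ PySem.Chars.find rest ['('] := pvFind_nonneg hj
        have hk0 : 0 ≤ PySem.Chars.find (PySem.List.slice rest (some (PySem.Chars.find rest ['('] + 1)) none) [')'] := pvFind_nonneg hk
        have hne : rest ≠ [] := pvFind_ne_nil hj
        have hlen2 : (PySem.List.slice (PySem.List.slice rest (some (PySem.Chars.find rest ['('] + 1)) none) (some (PySem.Chars.find (PySem.List.slice rest (some (PySem.Chars.find rest ['('] + 1)) none) [')'] + 1)) none).length ≤ n := by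
          have hk0' := hk0
          rw [PySem.List.slice_from rest (by omega)] at hk0'
          rw [PySem.List.slice_from rest (by omega), PySem.List.slice_from _ (by omega)]
          simp only [List.length_drop]
          have : 0 < rest.length := List.length_pos_of_ne_nil hne
          omega
        rw [ih _ hlen2]
        conv_rhs => rw [ih _ hlen2]
        simp

-- main correspondence: A's loop equals ans ++ flatten of B's pieces
theorem pvMain (d : PySem.Dict String String) : ∀ (n : Nat) (rest : List Char),
    rest.length ≤ n → ∀ ans,
    evalLoopA d ans rest = ans ++ (evalLoopB d [] rest).flatten := by
  intro n
  induction n with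
  | zero =>
    intro rest hlen ans
    have : rest = [] := List.eq_nil_of_length_eq_zero (by omega)
    subst this
    rw [evalLoopA, evalLoopB]
    simp [pvFindChar_none (by simp : '(' ∉ ([] : List Char))]
  | succ n ih =>
    intro rest hlen ans
    by_cases hj : PySem.Chars.find rest ['('] = -1
    · -- no '(' in rest: A copies it, B emits [rest]
      have hno : '(' ∉ rest := by
        have hj' := hj
        rw [PySem.Chars.find_eq_neg_one_iff] at hj'
        intro hm; exact hj' ((List.singleton_infix_iff _ _).mpr hm)
      rw [evalLoopB, dif_pos hj]
      have := pvLoopA_copy d rest hno ans []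
      simp at this
      simp [this, evalLoopA]
    · have hj0 : 0 ≤ PySem.Chars.find rest ['('] := pvFind_nonneg hj
      obtain ⟨hjlt, hdecomp, hjpre⟩ := pvFindChar_decomp rest '(' hj
      set jn := (PySem.Chars.find rest ['(']).toNat with hjn
      set pre := rest.take jn with hpre
      set t := rest.drop (jn + 1) with ht
      -- A side: copy pre, then hit '('
      have hA : evalLoopA d ans rest =
          evalLoopA d (ans ++ pre ++ (d.getD (String.mk (evalCollect [] t).1) "?").toList)
            (evalCollect [] t).2 := by
        conv_lhs => rw [hdecomp]
        rw [pvLoopA_copy d pre hjpre ans ('(' :: t), evalLoopA, if_pos rfl]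
      -- B side: unfold once
      have hslice1 : PySem.List.slice rest none (some (PySem.Chars.find rest ['('])) = pre := by
        rw [PySem.List.slice_to rest hj0]
      have hslice2 : PySem.List.slice rest (some (PySem.Chars.find rest ['('] + 1)) none = t := by
        rw [PySem.List.slice_from rest (by omega), ht]
        congr 1
        omega
      rw [evalLoopB, dif_neg hj]
      simp only [hslice1, hslice2]
      by_cases hk : PySem.Chars.find t [')'] = -1
      · -- unterminated '(' : key is all of t
        have hno : ')' ∉ t := by
          have hk' := hk
          rw [PySem.Chars.find_eq_neg_one_iff] at hk'
          intro hm; exact hk' ((List.singleton_infix_iff _ _).mpr hm)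
        rw [dif_pos hk, hA, pvCollect_no t hno []]
        simp [evalLoopA]
      · have hk0 : 0 ≤ PySem.Chars.find t [')'] := pvFind_nonneg hk
        obtain ⟨hklt, hkdecomp, hkpre⟩ := pvFindChar_decomp t ')' hk
        set kn := (PySem.Chars.find t [')']).toNat with hkn
        set kpre := t.take kn with hkpre'
        set t2 := t.drop (kn + 1) with ht2
        have hslice3 : PySem.List.slice t none (some (PySem.Chars.find t [')'])) = kpre := by
          rw [PySem.List.slice_to t hk0]
        have hslice4 : PySem.List.slice t (some (PySem.Chars.find t [')'] + 1)) none = t2 := by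
          rw [PySem.List.slice_from t (by omega), ht2]
          congr 1
          omega
        rw [dif_neg hk]
        simp only [hslice3, hslice4]
        have hcol : evalCollect [] t = (kpre, t2) := by
          conv_lhs => rw [hkdecomp]
          rw [pvCollect_split kpre t2 hkpre []]
          simp
        have hlen2 : t2.length ≤ n := by
          have h1 : rest.length = pre.length + 1 + t.length := by
            conv_lhs => rw [hdecomp]
            simp
            omega
          have h2 : t2.length ≤ t.length := by
            rw [ht2]; simp
          omega
        rw [hA, hcol]
        rw [ih t2 hlen2]
        conv_rhs => rw [pvLoopB_out d n t2 hlen2]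
        simp

-- ===== VERDICT (by name: the statement is the Claim_ definition above) =====
theorem evaluate_spec : Claim_equal_evaluate := by
  intro s knowledge _hdom _hpre
  unfold Spec_evaluate evaluate evaluate_alt
  rw [pvJoin_flatten, pvMain (pvBuildDict knowledge) s.toList.length s.toList le_rfl []]
  simp
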